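-- pv_equiv track=rewrite | github.com/OriginNeuralAI/u24-spectral-operator | scripts/reconstruct_J.py | basin_id
-- ===== SOURCE A (Python) =====
-- REEDS_TABLE = [2, 2, 3, 5, 14, 2, 6, 5, 14, 15,
--                20, 22, 14, 8, 13, 20, 11, 8, 8, 15,
--                15, 15, 2]
--
-- def soyga_f(x: int) -> int:
--     """Apply the Reeds endomorphism f: Z_23 -> Z_23."""
--     return REEDS_TABLE[x % 23]
--
-- def basin_id(x: int) -> int:
--     """Classify x into one of 4 attractor basins under iteration of f.
--
--     Returns:
--         0 = Creation  (c->d->f->c, period 3, size 9)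
--         1 = Perception (p->o->i->p, period 3, size 7)
--         2 = Stability  (g->g, period 1, size 1)
--         3 = Exchange   (q<->x, period 2, size 6)
--     """
--     visited = [False] * 23
--     current = x % 23
--
--     while not visited[current]:
--         visited[current] = True
--         current = soyga_f(current)
--
--     # Determine cycle length
--     cycle_start = current
--     cycle_len = 1
--     c = soyga_f(cycle_start)
--     while c != cycle_start:
--         c = soyga_f(c)
--         cycle_len += 1
--
--     if cycle_len == 1:
--         return 2  # Stability (g=6 fixed point)
--     elif cycle_len == 2:
--         return 3  # Exchange (q<->x 2-cycle)
--     elif cycle_len == 3: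
--         # Creation cycle: c=2, d=3, f=5 (all <= 5)
--         # Perception cycle: i=8, o=13, p=14 (all > 5)
--         if cycle_start <= 5:
--             return 0  # Creation
--         else:
--             return 1  # Perception
--     return 0
-- ===== SOURCE B (Python) =====
-- REEDS_TABLE = [2, 2, 3, 5, 14, 2, 6, 5, 14, 15,
--                20, 22, 14, 8, 13, 20, 11, 8, 8, 15,
--                15, 15, 2]
--
-- def _f(y: int) -> int:
--     return REEDS_TABLE[y % 23]
--
-- def _classify(r: int) -> int:
--     # After 23 applications of f we are guaranteed to sit on the attractor cycle.
--     y = r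
--     for _ in range(23):
--         y = _f(y)
--     if _f(y) == y:
--         return 2           # fixed point
--     if _f(_f(y)) == y:
--         return 3           # 2-cycle
--     return 0 if y <= 5 else 1  # 3-cycles: Creation elements are all <= 5, Perception all > 5
--
-- BASIN_TABLE = [_classify(r) for r in range(23)]
--
-- def basin_id(x: int) -> int:
--     return BASIN_TABLE[x % 23]
-- ===== Notes on version B (the rewrite author's own statement) =====
-- stated objective: simpler
-- what changed: B precomputes a 23-entry basin table once (iterating f 23 times per residue and classifying the reached cycle by direct membership tests), so each basin_id call is a single table lookup instead of A's per-call visited-array orbit walk plus cycle-length loop.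
import Mathlib
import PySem

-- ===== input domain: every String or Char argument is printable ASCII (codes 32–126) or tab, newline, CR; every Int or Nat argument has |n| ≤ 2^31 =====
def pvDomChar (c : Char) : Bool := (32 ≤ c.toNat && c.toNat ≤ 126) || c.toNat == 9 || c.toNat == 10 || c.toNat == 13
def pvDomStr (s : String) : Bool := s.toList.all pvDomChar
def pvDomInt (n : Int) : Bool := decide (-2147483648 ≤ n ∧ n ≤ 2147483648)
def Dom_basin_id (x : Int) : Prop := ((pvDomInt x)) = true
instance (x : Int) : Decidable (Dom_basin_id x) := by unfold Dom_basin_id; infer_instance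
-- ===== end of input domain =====

-- B replaces A's per-call orbit walk and cycle-length loop by a precomputed 23-entry
-- basin table: each call is a single table lookup.
-- ===== PORT A =====
def pvReedsTable : List Int :=
  [2, 2, 3, 5, 14, 2, 6, 5, 14, 15,
   20, 22, 14, 8, 13, 20, 11, 8, 8, 15,
   15, 15, 2]

-- REEDS_TABLE[x % 23]: the index x % 23 is always in 0..22, so the IndexError branch
-- (getD default) is unreachable; exact on all Int.
def soyga_f (x : Int) : Int :=
  (PySem.List.pyGet? pvReedsTable (PySem.Int.mod x 23)).getD 0

-- the `while not visited[current]` loop; fuel 24 > 23 is a pure termination guard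
-- (the loop marks a fresh cell each step, so it stops within 23 iterations).
-- visited[current] read/write: current is always in 0..22, so pyGetD/pySetD are exact.
def pvWalkA (fuel : Nat) (visited : List Bool) (current : Int) : Int :=
  match fuel with
  | 0 => current
  | fuel + 1 =>
    if PySem.List.pyGetD visited current false then current
    else pvWalkA fuel (PySem.List.pySetD visited current true) (soyga_f current)

-- the `while c != cycle_start` loop; fuel 23 is a pure termination guard
def pvCycleLenA (fuel : Nat) (cycle_start c cycle_len : Int) : Int :=
  match fuel with
  | 0 => cycle_len
  | fuel + 1 =>
    if c = cycle_start then cycle_len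
    else pvCycleLenA fuel cycle_start (soyga_f c) (cycle_len + 1)

def basin_id (x : Int) : Int :=
  let cycle_start := pvWalkA 24 (List.replicate 23 false) (PySem.Int.mod x 23)
  let cycle_len := pvCycleLenA 23 cycle_start (soyga_f cycle_start) 1
  if cycle_len = 1 then 2
  else if cycle_len = 2 then 3
  else if cycle_len = 3 then
    if cycle_start ≤ 5 then 0 else 1
  else 0

-- ===== PORT B =====
def pvFB (y : Int) : Int :=
  (PySem.List.pyGet? pvReedsTable (PySem.Int.mod y 23)).getD 0

-- `for _ in range(23): y = _f(y)` then classify the reached cycle element directly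
def pvClassifyB (r : Int) : Int :=
  let y := (List.range 23).foldl (fun y _ => pvFB y) r
  if pvFB y = y then 2
  else if pvFB (pvFB y) = y then 3
  else if y ≤ 5 then 0 else 1

def pvBasinTable : List Int :=
  (List.range 23).map (fun r => pvClassifyB (Int.ofNat r))

def basin_id_alt (x : Int) : Int :=
  (PySem.List.pyGet? pvBasinTable (PySem.Int.mod x 23)).getD 0

-- ===== PRECONDITION & SPEC =====
def Spec_basin_id (x : Int) (out : Int) : Prop := out = basin_id_alt x
instance (x : Int) (out : Int) : Decidable (Spec_basin_id x out) := by unfold Spec_basin_id; infer_instance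

-- ===== CLAIM (what is proved, stated in full; the proofs are below) =====
def Claim_equal_basin_id : Prop := ∀ (x : Int), Dom_basin_id x → Spec_basin_id x (basin_id x)

-- ===== LEMMAS AND PROOFS =====

-- ===== VERDICT (by name: the statement is the Claim_ definition above) =====
theorem pv_mod_idem (x : Int) :
    PySem.Int.mod (PySem.Int.mod x 23) 23 = PySem.Int.mod x 23 := by
  rw [PySem.Int.mod_eq_emod_of_pos (by norm_num), PySem.Int.mod_eq_emod_of_pos (by norm_num)]
  omega

-- both ports depend on x only through x % 23
theorem basin_id_mod (x : Int) : basin_id x = basin_id (PySem.Int.mod x 23) := by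
  simp only [basin_id, pv_mod_idem]

theorem basin_id_alt_mod (x : Int) : basin_id_alt x = basin_id_alt (PySem.Int.mod x 23) := by
  simp only [basin_id_alt, pv_mod_idem]

set_option maxRecDepth 8000 in
theorem basin_eq_on_residues (r : Int) (h0 : 0 ≤ r) (h1 : r < 23) :
    basin_id r = basin_id_alt r := by
  interval_cases r <;> decide

theorem basin_id_spec : Claim_equal_basin_id := by
  intro x _
  unfold Spec_basin_id
  rw [basin_id_mod, basin_id_alt_mod]
  exact basin_eq_on_residues _ (PySem.Int.mod_nonneg x (by norm_num))
    (PySem.Int.mod_lt x (by norm_num))
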